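-- pv_equiv track=rewrite | github.com/tiaadri15/Dyscover | PythonServer/predict.py | hitung_kata_benar
-- ===== SOURCE A (Python) =====
-- def hitung_kata_benar(teks_hasil, teks_asli):
--     kata_hasil = teks_hasil.split()
--     kata_asli = teks_asli.split()
--     benar = 0
--     salah = 0
--     panjang = max(len(kata_asli), len(kata_hasil))
--     for i in range(panjang):
--         if i < len(kata_asli) and i < len(kata_hasil):
--             if kata_hasil[i] == kata_asli[i]:
--                 benar += 1
--             else:
--                 salah += 1
--         else:
--             # Kata ekstra di salah satu list dihitung salah
--             salah += 1
--     return benar, salah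
-- ===== SOURCE B (Python) =====
-- def hitung_kata_benar(teks_hasil, teks_asli):
--     def go(hs, os):
--         if not hs:
--             return (0, len(os))
--         if not os:
--             return (0, len(hs))
--         b, s = go(hs[1:], os[1:])
--         if hs[0] == os[0]:
--             return (b + 1, s)
--         return (b, s + 1)
--     return go(teks_hasil.split(), teks_asli.split())
-- ===== Notes on version B (the rewrite author's own statement) =====
-- stated objective: alternative
-- what changed: Replaces A's indexed range(max)-loop with bounds tests and counters by a structural recursion that consumes both word lists head-by-head, returning the remaining tail's length as the wrong count at the base case; no indices, no max(), no length-based branch inside the loop.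
import Mathlib
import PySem

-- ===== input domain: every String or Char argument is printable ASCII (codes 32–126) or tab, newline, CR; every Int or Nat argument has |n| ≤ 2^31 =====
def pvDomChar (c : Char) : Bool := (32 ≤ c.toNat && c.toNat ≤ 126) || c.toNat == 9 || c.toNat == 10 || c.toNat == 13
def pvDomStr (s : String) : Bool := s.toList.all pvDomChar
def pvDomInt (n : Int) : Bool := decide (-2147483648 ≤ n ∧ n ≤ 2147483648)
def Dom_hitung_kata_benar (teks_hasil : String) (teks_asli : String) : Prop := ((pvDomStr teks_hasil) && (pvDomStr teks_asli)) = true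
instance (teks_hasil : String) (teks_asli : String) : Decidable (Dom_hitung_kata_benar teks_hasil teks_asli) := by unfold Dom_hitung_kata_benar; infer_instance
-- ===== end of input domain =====

-- B replaces A's indexed range(max)-loop (with bounds tests and branches) by a structural
-- recursion consuming both word lists head-by-head; the leftover tail's length is the wrong
-- count at the base case (objective: alternative decomposition, same cost).

-- ===== PORT A =====
def hitung_kata_benar (teks_hasil : String) (teks_asli : String) : Int × Int :=
  let kata_hasil := PySem.Str.split₀ teks_hasil
  let kata_asli := PySem.Str.split₀ teks_asli
  let panjang : Int := max (kata_asli.length : Int) (kata_hasil.length : Int)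
  (PySem.List.pyRange 0 panjang 1).foldl (fun (bs : Int × Int) i =>
    if i < (kata_asli.length : Int) ∧ i < (kata_hasil.length : Int) then
      if PySem.List.pyGetD kata_hasil i "" = PySem.List.pyGetD kata_asli i "" then
        (bs.1 + 1, bs.2)
      else
        (bs.1, bs.2 + 1)
    else
      (bs.1, bs.2 + 1)) (0, 0)

-- ===== PORT B =====
-- Source B's inner helper 'go': structural recursion on the two word lists.
def pvGo_hitung_kata_benar : List String → List String → Int × Int
  | [], os => (0, (os.length : Int))
  | hs@(_ :: _), [] => (0, (hs.length : Int))
  | h :: hs, o :: os =>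
    let bs := pvGo_hitung_kata_benar hs os
    if h = o then (bs.1 + 1, bs.2) else (bs.1, bs.2 + 1)

def hitung_kata_benar_alt (teks_hasil : String) (teks_asli : String) : Int × Int :=
  pvGo_hitung_kata_benar (PySem.Str.split₀ teks_hasil) (PySem.Str.split₀ teks_asli)

-- ===== PRECONDITION & SPEC =====
def Spec_hitung_kata_benar (teks_hasil : String) (teks_asli : String) (out : Int × Int) : Prop := out = hitung_kata_benar_alt teks_hasil teks_asli
instance (teks_hasil : String) (teks_asli : String) (out : Int × Int) : Decidable (Spec_hitung_kata_benar teks_hasil teks_asli out) := by unfold Spec_hitung_kata_benar; infer_instance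

-- ===== CLAIM (what is proved, stated in full; the proofs are below) =====
def Claim_equal_hitung_kata_benar : Prop := ∀ (teks_hasil : String) (teks_asli : String), Dom_hitung_kata_benar teks_hasil teks_asli → Spec_hitung_kata_benar teks_hasil teks_asli (hitung_kata_benar teks_hasil teks_asli)

-- ===== LEMMAS AND PROOFS =====

-- After n steps of A's loop: benar = matches among the first n zipped positions, salah = n - benar.
theorem pv_loop_aux (xs ys : List String) (n : Nat) :
    (PySem.List.pyRange 0 (n : Int) 1).foldl (fun (bs : Int × Int) i =>
      if i < (ys.length : Int) ∧ i < (xs.length : Int) then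
        if PySem.List.pyGetD xs i "" = PySem.List.pyGetD ys i "" then
          (bs.1 + 1, bs.2)
        else
          (bs.1, bs.2 + 1)
      else
        (bs.1, bs.2 + 1)) (0, 0)
    = ((((xs.zip ys).take n).countP (fun p => p.1 == p.2) : Int),
       (n : Int) - (((xs.zip ys).take n).countP (fun p => p.1 == p.2) : Int)) := by
  induction n with
  | zero => simp [PySem.List.pyRange_one_eq_nil]
  | succ n ih =>
    have hsucc : ((n + 1 : Nat) : Int) = (n : Int) + 1 := by push_cast; ring
    rw [hsucc, PySem.List.pyRange_one_succ_right (by positivity), List.foldl_append, ih]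
    simp only [List.foldl_cons, List.foldl_nil]
    by_cases h : (n : Int) < (ys.length : Int) ∧ (n : Int) < (xs.length : Int)
    · obtain ⟨hy, hx⟩ := h
      have hyn : n < ys.length := by exact_mod_cast hy
      have hxn : n < xs.length := by exact_mod_cast hx
      have hz : n < (xs.zip ys).length := by rw [List.length_zip]; omega
      have hzn : (xs.zip ys)[n]? = some (xs[n], ys[n]) := by
        rw [List.getElem?_eq_getElem hz]; simp [List.getElem_zip]
      have htake : (xs.zip ys).take (n + 1) = (xs.zip ys).take n ++ [(xs[n], ys[n])] := by
        rw [List.take_add_one, hzn]; rfl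
      have hc : (List.countP (fun p => p.1 == p.2) [((xs[n], ys[n]) : String × String)])
          = (if xs[n] = ys[n] then 1 else 0) := by
        simp [List.countP_cons]
      have hgx : xs.getD n "" = xs[n] := List.getD_eq_getElem _ _ hxn
      have hgy : ys.getD n "" = ys[n] := List.getD_eq_getElem _ _ hyn
      rw [if_pos ⟨hy, hx⟩, PySem.List.pyGetD_natCast xs n _, PySem.List.pyGetD_natCast ys n _,
        htake, List.countP_append, hgx, hgy, hc]
      by_cases he : xs[n] = ys[n]
      · rw [if_pos he, if_pos he]
        simp only [Prod.mk.injEq]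
        refine ⟨by push_cast; ring, by push_cast; ring⟩
      · rw [if_neg he, if_neg he]
        simp only [Prod.mk.injEq]
        refine ⟨by push_cast; ring, by push_cast; ring⟩
    · have hlen : (xs.zip ys).length ≤ n := by
        rw [List.length_zip]
        rcases not_and_or.mp h with h' | h' <;> omega
      have htake : (xs.zip ys).take (n + 1) = (xs.zip ys).take n := by
        rw [List.take_of_length_le hlen, List.take_of_length_le (by omega)]
      rw [if_neg h, htake]
      simp only [Prod.mk.injEq]
      refine ⟨by trivial, by push_cast; ring⟩

-- B's recursion computes (matches of the zip, max length − matches).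
theorem pv_go_eq (xs ys : List String) :
    pvGo_hitung_kata_benar xs ys
    = (((xs.zip ys).countP (fun p => p.1 == p.2) : Int),
       ((max ys.length xs.length : Nat) : Int) - ((xs.zip ys).countP (fun p => p.1 == p.2) : Int)) := by
  induction xs generalizing ys with
  | nil => simp [pvGo_hitung_kata_benar]
  | cons h hs ih =>
    cases ys with
    | nil => simp [pvGo_hitung_kata_benar]
    | cons o os =>
      have hgo : pvGo_hitung_kata_benar (h :: hs) (o :: os) =
          (if h = o then ((pvGo_hitung_kata_benar hs os).1 + 1, (pvGo_hitung_kata_benar hs os).2)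
           else ((pvGo_hitung_kata_benar hs os).1, (pvGo_hitung_kata_benar hs os).2 + 1)) := rfl
      rw [hgo, ih]
      by_cases he : h = o
      · have hb : (((h, o) : String × String).1 == (h, o).2) = true := by simpa using he
        rw [if_pos he]
        simp only [List.zip_cons_cons, List.countP_cons, hb, if_true, List.length_cons,
          Prod.mk.injEq]
        constructor <;> (push_cast; omega)
      · have hb : (((h, o) : String × String).1 == (h, o).2) = false := by simpa using he
        rw [if_neg he]
        simp only [List.zip_cons_cons, List.countP_cons, hb, if_false, List.length_cons,
          Prod.mk.injEq]
        constructor <;> (push_cast; omega)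

-- ===== VERDICT (by name: the statement is the Claim_ definition above) =====
theorem hitung_kata_benar_spec : Claim_equal_hitung_kata_benar := by
  intro th ta _
  unfold Spec_hitung_kata_benar hitung_kata_benar hitung_kata_benar_alt
  dsimp only
  set xs := PySem.Str.split₀ th with hxs
  set ys := PySem.Str.split₀ ta with hys
  have hmax : max (ys.length : Int) (xs.length : Int) = ((max ys.length xs.length : Nat) : Int) := by
    push_cast; rfl
  have hz : (xs.zip ys).length ≤ max ys.length xs.length := by
    rw [List.length_zip]; omega
  have htake : (xs.zip ys).take (max ys.length xs.length) = xs.zip ys :=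
    List.take_of_length_le hz
  rw [hmax, pv_loop_aux xs ys (max ys.length xs.length), htake, pv_go_eq]
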